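-- pv_equiv track=rewrite | github.com/TinaZhelyazova/02.-Python-Fundamentals | 16. Text Processing - Exercise/10. Winning Ticket.py | is_winning_ticket
-- ===== SOURCE A (Python) =====
-- def is_winning_ticket(ticket):
--     if len(ticket) != 20:
--         return "invalid ticket"
--
--     first_half = ticket[:10]
--     second_half = ticket[10:]
--     for symbol in symbols:
--         for symbol_length in range(10, 5, -1):
--             match_symbol = symbol * symbol_length
--             if match_symbol in first_half and match_symbol in second_half:
--                 if len(match_symbol) == 10:
--                     return f'ticket "{ticket}" - {len(match_symbol)}{symbol} Jackpot!'
--                 return f'ticket "{ticket}" - {len(match_symbol)}{symbol}'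
--     return f'ticket "{ticket}" - no match'
--
-- symbols = ['@', '#', '$', '^']
-- ===== SOURCE B (Python) =====
-- def _max_run(half, symbol):
--     best = cur = 0
--     for ch in half:
--         cur = cur + 1 if ch == symbol else 0
--         if cur > best:
--             best = cur
--     return best
--
--
-- def is_winning_ticket(ticket):
--     if len(ticket) != 20:
--         return "invalid ticket"
--     first_half = ticket[:10]
--     second_half = ticket[10:]
--     for symbol in ['@', '#', '$', '^']:
--         m = min(_max_run(first_half, symbol), _max_run(second_half, symbol))
--         if m >= 6:
--             if m == 10:
--                 return f'ticket "{ticket}" - 10{symbol} Jackpot!'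
--             return f'ticket "{ticket}" - {m}{symbol}'
--     return f'ticket "{ticket}" - no match'
-- ===== Notes on version B (the rewrite author's own statement) =====
-- stated objective: simpler
-- what changed: Replaces the candidate-string generation plus substring search (5 lengths x 2 halves per symbol) with a single linear run-length scan of each half per symbol, taking m = min of the two longest runs and formatting directly.
import Mathlib
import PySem

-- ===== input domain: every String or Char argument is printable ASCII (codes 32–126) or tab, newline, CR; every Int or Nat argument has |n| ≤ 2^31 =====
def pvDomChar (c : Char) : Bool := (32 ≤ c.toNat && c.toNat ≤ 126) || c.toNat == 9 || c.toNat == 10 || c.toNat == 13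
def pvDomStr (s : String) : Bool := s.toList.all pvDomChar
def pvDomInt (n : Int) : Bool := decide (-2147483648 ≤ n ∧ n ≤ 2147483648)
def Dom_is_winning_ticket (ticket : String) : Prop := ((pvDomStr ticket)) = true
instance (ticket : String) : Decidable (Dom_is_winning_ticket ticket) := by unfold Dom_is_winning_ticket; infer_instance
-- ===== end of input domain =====

-- B replaces A's candidate-string generation + substring searches by one run-length
-- scan per symbol and half, taking m = min of the two longest runs (objective: simpler).

-- ===== PORT A =====
-- inner loop: for symbol_length in range(10, 5, -1)
def pvInnerA (ticket : String) (first_half second_half : String) (symbol : Char) :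
    List Int → Option String
  | [] => none
  | symbol_length :: rest =>
    -- match_symbol = symbol * symbol_length (symbol_length is 10..6 here, so toNat is exact)
    let match_symbol : List Char := List.replicate symbol_length.toNat symbol
    if PySem.Str.isIn (String.ofList match_symbol) first_half &&
       PySem.Str.isIn (String.ofList match_symbol) second_half then
      if match_symbol.length = 10 then
        some ("ticket \"" ++ ticket ++ "\" - " ++ PySem.Int.toStr (match_symbol.length : Int) ++
              String.singleton symbol ++ " Jackpot!")
      else
        some ("ticket \"" ++ ticket ++ "\" - " ++ PySem.Int.toStr (match_symbol.length : Int) ++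
              String.singleton symbol)
    else pvInnerA ticket first_half second_half symbol rest

-- outer loop: for symbol in symbols
def pvOuterA (ticket : String) (first_half second_half : String) : List Char → Option String
  | [] => none
  | symbol :: rest =>
    match pvInnerA ticket first_half second_half symbol (PySem.List.pyRange 10 5 (-1)) with
    | some r => some r
    | none => pvOuterA ticket first_half second_half rest

def pySymbols : List Char := ['@', '#', '$', '^']

def is_winning_ticket (ticket : String) : String :=
  if PySem.Str.len ticket ≠ 20 then "invalid ticket"
  else
    let first_half := String.ofList (PySem.List.slice ticket.toList none (some 10))
    let second_half := String.ofList (PySem.List.slice ticket.toList (some 10) none)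
    match pvOuterA ticket first_half second_half pySymbols with
    | some r => r
    | none => "ticket \"" ++ ticket ++ "\" - no match"

-- ===== PORT B =====
-- _max_run(half, symbol): single scan keeping (best, cur)
def pvMaxRun (half : String) (symbol : Char) : Nat :=
  (half.toList.foldl (fun (bc : Nat × Nat) ch =>
      let cur := if ch == symbol then bc.2 + 1 else 0
      (if cur > bc.1 then cur else bc.1, cur)) (0, 0)).1

def pvLoopB (ticket : String) (first_half second_half : String) : List Char → Option String
  | [] => none
  | symbol :: rest =>
    let m := min (pvMaxRun first_half symbol) (pvMaxRun second_half symbol)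
    if 6 ≤ m then
      if m = 10 then
        some ("ticket \"" ++ ticket ++ "\" - 10" ++ String.singleton symbol ++ " Jackpot!")
      else
        some ("ticket \"" ++ ticket ++ "\" - " ++ PySem.Int.toStr (m : Int) ++
              String.singleton symbol)
    else pvLoopB ticket first_half second_half rest

def is_winning_ticket_alt (ticket : String) : String :=
  if PySem.Str.len ticket ≠ 20 then "invalid ticket"
  else
    let first_half := String.ofList (PySem.List.slice ticket.toList none (some 10))
    let second_half := String.ofList (PySem.List.slice ticket.toList (some 10) none)
    match pvLoopB ticket first_half second_half ['@', '#', '$', '^'] with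
    | some r => r
    | none => "ticket \"" ++ ticket ++ "\" - no match"

-- ===== PRECONDITION & SPEC =====
def Spec_is_winning_ticket (ticket : String) (out : String) : Prop := out = is_winning_ticket_alt ticket
instance (ticket : String) (out : String) : Decidable (Spec_is_winning_ticket ticket out) := by unfold Spec_is_winning_ticket; infer_instance

-- ===== CLAIM (what is proved, stated in full; the proofs are below) =====
def Claim_equal_is_winning_ticket : Prop := ∀ (ticket : String), Dom_is_winning_ticket ticket → Spec_is_winning_ticket ticket (is_winning_ticket ticket)

-- ===== LEMMAS AND PROOFS =====

-- head run of c
def pvHr (c : Char) : List Char → Nat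
  | [] => 0
  | x :: xs => if x = c then pvHr c xs + 1 else 0

-- longest run of c (max of head runs over all suffixes)
def pvMr (c : Char) : List Char → Nat
  | [] => 0
  | x :: xs => max (pvHr c (x :: xs)) (pvMr c xs)

theorem pvHr_replicate_append (c : Char) (j : Nat) (m : List Char) :
    pvHr c (List.replicate j c ++ m) = j + pvHr c m := by
  induction j with
  | zero => simp
  | succ n ih => simp [List.replicate_succ, pvHr, ih]; omega

theorem pvMr_replicate_append (c : Char) (j : Nat) (m : List Char) :
    pvMr c (List.replicate j c ++ m) = max (j + pvHr c m) (pvMr c m) := by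
  induction j with
  | zero =>
    simp
    cases m with
    | nil => simp [pvHr, pvMr]
    | cons x xs => simp [pvMr]
  | succ n ih =>
    simp [List.replicate_succ, pvMr, pvHr, pvHr_replicate_append, ih]
    omega

theorem pvMr_replicate (c : Char) (j : Nat) : pvMr c (List.replicate j c) = j := by
  have := pvMr_replicate_append c j []
  simp [pvHr, pvMr] at this
  omega

theorem pvMr_le_length (c : Char) (l : List Char) : pvMr c l ≤ l.length := by
  induction l with
  | nil => simp [pvMr]
  | cons x xs ih =>
    have h : ∀ t : List Char, pvHr c t ≤ t.length := by
      intro t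
      induction t with
      | nil => simp [pvHr]
      | cons y ys ihy => by_cases hy : y = c <;> simp [pvHr, hy] <;> omega
    simp only [pvMr, List.length_cons]
    have := h (x :: xs)
    simp at this
    omega

-- fold invariant for B's scan
theorem pvFold_invariant (c : Char) (l : List Char) :
    ∀ (b j : Nat), j ≤ b →
      ((l.foldl (fun (bc : Nat × Nat) ch =>
          let cur := if ch == c then bc.2 + 1 else 0
          (if cur > bc.1 then cur else bc.1, cur)) (b, j)).1
        = max b (pvMr c (List.replicate j c ++ l))) := by
  induction l with
  | nil =>
    intro b j hj
    simp [pvMr_replicate]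
    omega
  | cons x xs ih =>
    intro b j hj
    rw [List.foldl_cons]
    by_cases hx : x = c
    · have hstep : (let cur := if x == c then (b, j).2 + 1 else 0
          (if cur > (b, j).1 then cur else (b, j).1, cur)) = ((max b (j + 1), j + 1) : Nat × Nat) := by
        simp only [hx, beq_self_eq_true, if_true, Prod.mk.injEq]
        refine ⟨?_, trivial⟩
        split <;> omega
      rw [hstep, ih _ _ (by omega)]
      have hrepl : List.replicate j c ++ x :: xs = List.replicate (j + 1) c ++ xs := by
        subst hx
        simp [List.replicate_succ']
      rw [hrepl, pvMr_replicate_append]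
      omega
    · have hstep : (let cur := if x == c then (b, j).2 + 1 else 0
          (if cur > (b, j).1 then cur else (b, j).1, cur)) = ((b, 0) : Nat × Nat) := by
        simp [hx]
      rw [hstep, ih b 0 (Nat.zero_le b)]
      simp only [List.replicate_zero, List.nil_append]
      rw [pvMr_replicate_append]
      simp [pvMr, pvHr, hx]
      omega

theorem pvMaxRun_eq (l : List Char) (c : Char) : pvMaxRun (String.ofList l) c = pvMr c l := by
  unfold pvMaxRun
  have h := pvFold_invariant c l 0 0 (le_refl 0)
  simp only [List.replicate_zero, List.nil_append, Nat.zero_max] at h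
  simpa using h

theorem pvReplicate_prefix_iff (c : Char) (k : Nat) (l : List Char) :
    List.replicate k c <+: l ↔ k ≤ pvHr c l := by
  induction k generalizing l with
  | zero => simp
  | succ n ih =>
    cases l with
    | nil => simp [pvHr, List.replicate_succ]
    | cons x xs =>
      by_cases hx : x = c
      · subst hx
        simp [List.replicate_succ, List.cons_prefix_cons, ih, pvHr]
      · simp [List.replicate_succ, List.cons_prefix_cons, pvHr, hx]
        intro h
        exact absurd h.symm hx

theorem pvReplicate_infix_iff (c : Char) (k : Nat) (l : List Char) :
    List.replicate k c <:+: l ↔ k ≤ pvMr c l := by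
  induction l with
  | nil => simp [pvMr, List.replicate_eq_nil_iff]
  | cons x xs ih =>
    rw [List.infix_cons_iff, pvReplicate_prefix_iff, ih]
    simp only [pvMr]
    omega

theorem pvIsIn_repl (k : Nat) (c : Char) (l : List Char) :
    PySem.Str.isIn (String.ofList (List.replicate k c)) (String.ofList l) = decide (k ≤ pvMr c l) := by
  by_cases h : k ≤ pvMr c l
  · simp only [h, decide_true]
    rw [PySem.Str.isIn_iff_infix]
    simpa using (pvReplicate_infix_iff c k l).mpr h
  · simp only [h, decide_false]
    rw [PySem.Str.isIn_eq, PySem.Chars.isIn_eq_false_iff]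
    simp only [String.toList_ofList]
    rw [pvReplicate_infix_iff]
    exact h

theorem pvAnd_decide_min (k a b : Nat) :
    (decide (k ≤ a) && decide (k ≤ b)) = decide (k ≤ min a b) := by
  by_cases h1 : k ≤ a <;> by_cases h2 : k ≤ b <;> simp [h1, h2] <;> omega

-- pull a literal through a string append
theorem pvLitStep (p a b ab : String) (h : a ++ b = ab) : p ++ a ++ b = p ++ ab := by
  rw [String.append_assoc, h]

theorem pvInner_eq (ticket : String) (fh sh : List Char) (s : Char)
    (h1 : fh.length = 10) (h2 : sh.length = 10) :
    pvInnerA ticket (String.ofList fh) (String.ofList sh) s (PySem.List.pyRange 10 5 (-1)) =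
      (let m := min (pvMr s fh) (pvMr s sh)
       if 6 ≤ m then
         if m = 10 then
           some ("ticket \"" ++ ticket ++ "\" - 10" ++ String.singleton s ++ " Jackpot!")
         else
           some ("ticket \"" ++ ticket ++ "\" - " ++ PySem.Int.toStr (m : Int) ++
                 String.singleton s)
       else none) := by
  have hrange : PySem.List.pyRange 10 5 (-1) = [10, 9, 8, 7, 6] := by decide
  rw [hrange]
  have hm1 : pvMr s fh ≤ 10 := h1 ▸ pvMr_le_length s fh
  have hm2 : pvMr s sh ≤ 10 := h2 ▸ pvMr_le_length s sh
  simp only [pvInnerA, pvIsIn_repl, List.length_replicate, pvAnd_decide_min]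
  set m := min (pvMr s fh) (pvMr s sh) with hm
  have hmle : m ≤ 10 := by omega
  interval_cases m <;> norm_num <;>
    first
      | (intro h; exact absurd h (by decide))
      | (rw [if_pos (by decide : Int.toNat 10 = 10),
             pvLitStep ("ticket \"" ++ ticket) "\" - " (PySem.Int.toStr 10) "\" - 10" (by decide)])

theorem pvOuter_eq (ticket : String) (fh sh : List Char)
    (h1 : fh.length = 10) (h2 : sh.length = 10) (syms : List Char) :
    pvOuterA ticket (String.ofList fh) (String.ofList sh) syms =
      pvLoopB ticket (String.ofList fh) (String.ofList sh) syms := by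
  induction syms with
  | nil => rfl
  | cons s rest ih =>
    rw [pvOuterA, pvLoopB, pvInner_eq ticket fh sh s h1 h2]
    simp only [pvMaxRun_eq]
    set m := min (pvMr s fh) (pvMr s sh) with hm
    by_cases h6 : 6 ≤ m
    · by_cases h10 : m = 10 <;> simp [h6, h10]
    · simp [h6, ih]

-- ===== VERDICT (by name: the statement is the Claim_ definition above) =====
theorem is_winning_ticket_spec : Claim_equal_is_winning_ticket := by
  intro ticket _
  unfold Spec_is_winning_ticket is_winning_ticket is_winning_ticket_alt
  by_cases hlen : PySem.Str.len ticket ≠ 20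
  · rw [if_pos hlen, if_pos hlen]
  · rw [if_neg hlen, if_neg hlen]
    have hl : ticket.toList.length = 20 := by
      simp only [PySem.Str.len, ne_eq, not_not] at hlen
      omega
    have hfh : PySem.List.slice ticket.toList none (some 10) = ticket.toList.take 10 := by
      rw [show (10 : Int) = ((10 : Nat) : Int) by norm_num, PySem.List.slice_to_natCast]
    have hsh : PySem.List.slice ticket.toList (some 10) none = ticket.toList.drop 10 := by
      rw [show (10 : Int) = ((10 : Nat) : Int) by norm_num, PySem.List.slice_from_natCast]
    have h1 : (ticket.toList.take 10).length = 10 := by simp [hl]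
    have h2 : (ticket.toList.drop 10).length = 10 := by simp [hl]
    simp only [hfh, hsh]
    rw [show pySymbols = ['@', '#', '$', '^'] from rfl,
      pvOuter_eq ticket _ _ h1 h2]
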